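-- pv_equiv track=rewrite | github.com/aogunwoolu/Ethereum-analysis | code files/D/scams analysis/popular scams/top10scams.py | addr_reducer
-- ===== SOURCE A (Python) =====
-- def addr_reducer(addr, items):
--     totalValue = 0
--     scamID = -1
--
--     for transOrScam in items:
--         if transOrScam[0] == 'T':
--             totalValue += transOrScam[1]
--         else:
--             scamID = transOrScam[1]
--
--     if scamID != -1:
--         yield(scamID, totalValue)
-- ===== SOURCE B (Python) =====
-- def addr_reducer(addr, items):
--     items = list(items)
--     total = sum(v for k, v in items if k == 'T')
--     scams = [v for k, v in items if k != 'T']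
--     if scams and scams[-1] != -1:
--         yield (scams[-1], total)
-- ===== Notes on version B (the rewrite author's own statement) =====
-- stated objective: alternative
-- what changed: Replaces the single fused accumulator loop with two independent filtered passes: a sum-comprehension over the 'T' items and a separate filter whose last element gives the scam ID.
import Mathlib
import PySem

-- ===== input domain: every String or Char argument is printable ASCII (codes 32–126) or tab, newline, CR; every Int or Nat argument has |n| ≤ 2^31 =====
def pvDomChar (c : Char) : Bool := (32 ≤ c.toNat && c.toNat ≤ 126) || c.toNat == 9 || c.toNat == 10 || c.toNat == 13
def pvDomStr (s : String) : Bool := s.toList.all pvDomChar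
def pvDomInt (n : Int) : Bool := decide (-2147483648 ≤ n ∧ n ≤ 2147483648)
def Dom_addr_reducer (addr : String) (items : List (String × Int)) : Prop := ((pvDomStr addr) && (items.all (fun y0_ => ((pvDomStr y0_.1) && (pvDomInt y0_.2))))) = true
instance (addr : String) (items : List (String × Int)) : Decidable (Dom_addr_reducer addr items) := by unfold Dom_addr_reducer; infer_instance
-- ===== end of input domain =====

-- ===== PORT A =====
-- B replaces A's single fused accumulator loop by two independent filtered passes (objective: alternative).
-- for-loop of A: state (totalValue, scamID), updated per item in order
def addrLoopA : List (String × Int) → Int × Int → Int × Int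
  | [], st => st
  | (k, v) :: rest, (t, s) =>
      addrLoopA rest (if k == "T" then (t + v, s) else (t, v))

def addr_reducer (addr : String) (items : List (String × Int)) : List (Int × Int) :=
  let st := addrLoopA items (0, -1)
  if st.2 ≠ -1 then [(st.2, st.1)] else []

-- ===== PORT B =====
def addr_reducer_alt (addr : String) (items : List (String × Int)) : List (Int × Int) :=
  let total := ((items.filter (fun x => x.1 == "T")).map (fun x => x.2)).sum
  let scams := ((items.filter (fun x => x.1 != "T")).map (fun x => x.2))
  match scams.getLast? with
  | some s => if s ≠ -1 then [(s, total)] else []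
  | none => []

-- ===== PRECONDITION & SPEC =====
def Spec_addr_reducer (addr : String) (items : List (String × Int)) (out : List (Int × Int)) : Prop := out = addr_reducer_alt addr items
instance (addr : String) (items : List (String × Int)) (out : List (Int × Int)) : Decidable (Spec_addr_reducer addr items out) := by unfold Spec_addr_reducer; infer_instance

-- ===== CLAIM (what is proved, stated in full; the proofs are below) =====
def Claim_equal_addr_reducer : Prop := ∀ (addr : String) (items : List (String × Int)), Dom_addr_reducer addr items → Spec_addr_reducer addr items (addr_reducer addr items)

-- ===== LEMMAS AND PROOFS =====

-- ===== VERDICT (by name: the statement is the Claim_ definition above) =====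
-- invariant of A's loop: final state = (t + sum of 'T' values, last non-'T' value or s)
theorem addrLoopA_eq (items : List (String × Int)) (t s : Int) :
    addrLoopA items (t, s) =
      (t + ((items.filter (fun x => x.1 == "T")).map (fun x => x.2)).sum,
       ((items.filter (fun x => x.1 != "T")).map (fun x => x.2)).getLastD s) := by
  induction items generalizing t s with
  | nil => simp [addrLoopA]
  | cons hd tl ih =>
    obtain ⟨k, v⟩ := hd
    by_cases hk : k = "T"
    · simp [addrLoopA, hk, ih]; ring
    · rw [addrLoopA, if_neg (by simp [hk]), ih]
      have h1 : List.filter (fun x => x.1 == "T") ((k, v) :: tl) =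
          List.filter (fun x => x.1 == "T") tl := by simp [hk]
      have h2 : List.filter (fun x => x.1 != "T") ((k, v) :: tl) =
          (k, v) :: List.filter (fun x => x.1 != "T") tl := by simp [hk]
      rw [h1, h2, List.map_cons, List.getLastD_cons]

theorem addr_reducer_spec : Claim_equal_addr_reducer := by
  intro addr items _
  unfold Spec_addr_reducer addr_reducer addr_reducer_alt
  rw [addrLoopA_eq]
  cases h : ((items.filter (fun x => x.1 != "T")).map (fun x => x.2)).getLast? with
  | none => simp [List.getLastD_eq_getLast?, h]
  | some s =>
    by_cases hs : s = -1 <;> simp [List.getLastD_eq_getLast?, h, hs]
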